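-- pv_equiv track=rewrite | github.com/Kusla75/dist-graph | scripts/partition.py | find_min_num_partiton
-- ===== SOURCE A (Python) =====
-- def find_min_num_partiton(partitions):
--     '''Finds partition with minimun number of nodes'''
--
--     minimum = len(partitions[0])
--     id_min = 0
--
--     for id in range(len(partitions)):
--         if minimum >= len(partitions[id]):
--             minimum = len(partitions[id])
--             id_min = id
--
--     return id_min
-- ===== SOURCE B (Python) =====
-- def find_min_num_partiton(partitions):
--     '''Finds partition with minimun number of nodes'''
--     lens = [len(p) for p in partitions]
--     minimum = min(lens)
--     return len(lens) - 1 - lens[::-1].index(minimum)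
-- ===== Notes on version B (the rewrite author's own statement) =====
-- stated objective: simpler
-- what changed: Replaces the online fold that tracks (minimum, id_min) with a value-first decomposition: compute the list of lengths, take min(), and locate the last occurrence (A's >= tie-break) via index() on the reversed list.
import Mathlib
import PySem

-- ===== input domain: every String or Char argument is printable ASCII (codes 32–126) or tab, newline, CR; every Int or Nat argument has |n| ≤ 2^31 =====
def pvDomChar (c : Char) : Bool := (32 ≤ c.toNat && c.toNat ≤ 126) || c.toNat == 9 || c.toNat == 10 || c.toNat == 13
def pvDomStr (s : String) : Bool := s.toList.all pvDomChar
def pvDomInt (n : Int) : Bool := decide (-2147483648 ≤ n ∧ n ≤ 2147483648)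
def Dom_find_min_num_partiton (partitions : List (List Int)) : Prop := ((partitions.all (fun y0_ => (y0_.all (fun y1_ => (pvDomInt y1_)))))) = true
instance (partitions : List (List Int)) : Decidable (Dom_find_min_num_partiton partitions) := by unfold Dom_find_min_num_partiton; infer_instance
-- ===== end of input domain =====

-- B replaces A's online (minimum, id_min) fold by a value-first decomposition: min of the
-- lengths, then the last occurrence located via index() on the reversed list (objective: simpler).


-- ===== PORT A =====
-- minimum = len(partitions[0]); id_min = 0; for id in range(len(partitions)):
--   if minimum >= len(partitions[id]): minimum = len(partitions[id]); id_min = id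
-- return id_min
def find_min_num_partiton (partitions : List (List Int)) : Int :=
  match PySem.List.pyGet? partitions 0 with
  | none => 0   -- IndexError on empty input: excluded by Pre_
  | some p0 =>
    let st := (PySem.List.pyRange 0 (partitions.length : Int) 1).foldl
      (fun (st : Int × Int) id =>
        if ((PySem.List.pyGetD partitions id []).length : Int) ≤ st.1 then
          (((PySem.List.pyGetD partitions id []).length : Int), id)
        else st)
      ((p0.length : Int), 0)
    st.2

-- ===== PORT B =====
-- lens = [len(p) for p in partitions]; minimum = min(lens)
-- return len(lens) - 1 - lens[::-1].index(minimum)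
def find_min_num_partiton_alt (partitions : List (List Int)) : Int :=
  let lens : List Int := partitions.map (fun p => (p.length : Int))
  match PySem.List.min? lens (fun x => x) with
  | none => 0   -- ValueError of min([]) on empty input: excluded by Pre_
  | some m =>
    match PySem.List.index? ((PySem.List.slice? lens none none (-1)).getD []) m with
    | none => 0   -- unreachable: m ∈ lens
    | some i => (lens.length : Int) - 1 - (i : Int)

-- ===== PRECONDITION & SPEC =====
-- Pre_ excludes only the empty list, on which A raises IndexError (and B raises ValueError).
def Pre_find_min_num_partiton (partitions : List (List Int)) : Prop := partitions ≠ []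
instance (partitions : List (List Int)) : Decidable (Pre_find_min_num_partiton partitions) := by unfold Pre_find_min_num_partiton; infer_instance
def pvWitness_find_min_num_partiton : List (List Int) := [[1, 2], [3]]
def Spec_find_min_num_partiton (partitions : List (List Int)) (out : Int) : Prop := out = find_min_num_partiton_alt partitions
instance (partitions : List (List Int)) (out : Int) : Decidable (Spec_find_min_num_partiton partitions out) := by unfold Spec_find_min_num_partiton; infer_instance

-- ===== CLAIM (what is proved, stated in full; the proofs are below) =====
def Claim_equal_find_min_num_partiton : Prop := ∀ (partitions : List (List Int)), Dom_find_min_num_partiton partitions → Pre_find_min_num_partiton partitions → Spec_find_min_num_partiton partitions (find_min_num_partiton partitions)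

-- ===== LEMMAS AND PROOFS =====

-- the fold body of A, seen on (index, value) pairs
def pvStep (st : Int × Int) (p : Int × Int) : Int × Int :=
  if p.2 ≤ st.1 then (p.2, p.1) else st

-- min of a :: t, as A's fold accumulates it
def pvMinv (a : Int) (t : List Int) : Int := t.foldl min a

theorem pvMinv_append (a x : Int) (t : List Int) :
    pvMinv a (t ++ [x]) = min (pvMinv a t) x := by
  simp [pvMinv]

theorem pvMinv_mem (a : Int) (t : List Int) : pvMinv a t ∈ a :: t := by
  induction t generalizing a with
  | nil => simp [pvMinv]
  | cons b t ih =>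
    have h := ih (min a b)
    simp only [pvMinv, List.foldl_cons] at h ⊢
    rcases List.mem_cons.mp h with h | h
    · rw [h]
      rcases le_total a b with hab | hab
      · simp [min_eq_left hab]
      · simp [min_eq_right hab]
    · simp [h]

theorem pvMinv_le (a : Int) (t : List Int) : ∀ y ∈ a :: t, pvMinv a t ≤ y := by
  induction t generalizing a with
  | nil => simp [pvMinv]
  | cons b t ih =>
    intro y hy
    have h := ih (min a b)
    simp [pvMinv, List.foldl_cons] at *
    rcases hy with rfl | rfl | hy
    · have := h.1; omega
    · have := h.1; omega
    · exact h.2 y hy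

-- A's fold over enumerate computes (min value, last index of that value)
theorem pvFold_enumerate (a : Int) (t : List Int) :
    (PySem.List.enumerate (a :: t) 0).foldl pvStep (a, 0) =
      (pvMinv a t, ((a :: t).length : Int) - 1 - ((a :: t).reverse.idxOf (pvMinv a t) : Int)) := by
  induction t using List.reverseRecOn with
  | nil => simp [PySem.List.enumerate, pvStep, pvMinv, List.idxOf]
  | append_singleton t x ih =>
    have henum : PySem.List.enumerate (a :: (t ++ [x])) 0 =
        PySem.List.enumerate (a :: t) 0 ++ [(((a :: t).length : Int), x)] := by
      have := PySem.List.enumerate_append (α := Int) (a :: t) [x] 0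
      simpa using this
    rw [henum, List.foldl_append, ih]
    simp only [List.foldl_cons, List.foldl_nil, pvStep]
    rw [show a :: (t ++ [x]) = (a :: t) ++ [x] by simp]
    rw [pvMinv_append]
    by_cases hx : x ≤ pvMinv a t
    · have hmin : min (pvMinv a t) x = x := by omega
      simp only [hx, if_pos, hmin]
      rw [List.reverse_append]
      simp [List.idxOf_cons_self]
    · have hmin : min (pvMinv a t) x = pvMinv a t := by omega
      simp only [if_neg hx, hmin]
      rw [List.reverse_append]
      have hne : x ≠ pvMinv a t := by omega
      simp only [List.reverse_singleton, List.singleton_append]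
      rw [List.idxOf_cons_ne _ hne]
      rw [Prod.mk.injEq]
      refine ⟨rfl, ?_⟩
      simp only [List.length_cons, List.length_append, List.length_nil, Nat.succ_eq_add_one]
      push_cast
      ring

-- A rewritten as the fold of pvStep over enumerate of the lengths
theorem pvA_eq_fold (p0 : List Int) (ps : List (List Int)) :
    find_min_num_partiton (p0 :: ps) =
      ((PySem.List.enumerate ((p0 :: ps).map (fun p => (p.length : Int))) 0).foldl pvStep
        ((p0.length : Int), 0)).2 := by
  have hget : PySem.List.pyGet? (p0 :: ps) 0 = some p0 := by
    simp [PySem.List.pyGet?, PySem.List.pyIdx?]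
  unfold find_min_num_partiton
  rw [hget]
  have hmap : PySem.List.enumerate ((p0 :: ps).map (fun p => (p.length : Int))) 0 =
      (PySem.List.enumerate (p0 :: ps) 0).map (fun q => (q.1, (q.2.length : Int))) := by
    generalize (0 : Int) = s
    generalize (p0 :: ps) = xs
    induction xs generalizing s with
    | nil => simp [PySem.List.enumerate_nil]
    | cons y ys ih => simp [PySem.List.enumerate_cons, ih]
  rw [hmap, List.foldl_map]
  have henum := PySem.List.enumerate_eq_map_pyRange (p0 :: ps) ([] : List Int)
  rw [henum, List.foldl_map]
  simp [pvStep]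

-- first index of a present element: idxOf? returns some idxOf
theorem pvIdxOf?_of_mem {xs : List Int} {v : Int} (h : v ∈ xs) :
    List.idxOf? v xs = some (List.idxOf v xs) := by
  induction xs with
  | nil => simp at h
  | cons x xs ih =>
    by_cases hx : x = v
    · subst hx; simp [List.idxOf?_cons, List.idxOf_cons_self]
    · rcases List.mem_cons.mp h with h' | h'
      · exact absurd h'.symm hx
      · simp [List.idxOf?_cons, hx, ih h', beq_iff_eq]

-- B on a nonempty list, unfolded
theorem pvB_eq (p0 : List Int) (ps : List (List Int)) :
    find_min_num_partiton_alt (p0 :: ps) =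
      ((((p0 :: ps).map (fun p => (p.length : Int))).length : Int) - 1 -
        ((((p0 :: ps).map (fun p => (p.length : Int))).reverse.idxOf
          (pvMinv (p0.length : Int) (ps.map (fun p => (p.length : Int))))) : Int)) := by
  have hlc : (p0 :: ps).map (fun p => (p.length : Int)) =
      (p0.length : Int) :: ps.map (fun p => (p.length : Int)) := by simp
  have hmem : pvMinv (p0.length : Int) (ps.map (fun p => (p.length : Int))) ∈
      (p0 :: ps).map (fun p => (p.length : Int)) := by rw [hlc]; exact pvMinv_mem _ _
  have hle : ∀ y ∈ (p0 :: ps).map (fun p => (p.length : Int)),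
      pvMinv (p0.length : Int) (ps.map (fun p => (p.length : Int))) ≤ y := by
    rw [hlc]; exact pvMinv_le _ _
  obtain ⟨m, hm⟩ : ∃ m, PySem.List.min? ((p0 :: ps).map (fun p => (p.length : Int)))
      (fun x => x) = some m := by
    cases h : PySem.List.min? ((p0 :: ps).map (fun p => (p.length : Int))) (fun x => x) with
    | none => rw [PySem.List.min?_eq_none_iff] at h; simp [h] at hmem
    | some m => exact ⟨m, rfl⟩
  have hmmem : m ∈ (p0 :: ps).map (fun p => (p.length : Int)) := PySem.List.min?_mem hm
  have hm_eq : m = pvMinv (p0.length : Int) (ps.map (fun p => (p.length : Int))) :=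
    le_antisymm (PySem.List.min?_isMin hm _ hmem) (hle m hmmem)
  have hmemr : m ∈ ((p0 :: ps).map (fun p => (p.length : Int))).reverse := by
    rw [List.mem_reverse]; exact hmmem
  have hidx : PySem.List.index? ((p0 :: ps).map (fun p => (p.length : Int))).reverse m =
      some (((p0 :: ps).map (fun p => (p.length : Int))).reverse.idxOf m) := by
    rw [PySem.List.index?_eq_idxOf?]
    exact pvIdxOf?_of_mem hmemr
  unfold find_min_num_partiton_alt
  dsimp only
  rw [hm, PySem.List.slice?_none_none_neg_one, Option.getD_some]
  dsimp only
  rw [hidx, hm_eq]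

-- ===== VERDICT (by name: the statement is the Claim_ definition above) =====
theorem find_min_num_partiton_spec : Claim_equal_find_min_num_partiton := by
  intro partitions _ hpre
  unfold Spec_find_min_num_partiton
  match partitions, hpre with
  | p0 :: ps, _ =>
    rw [pvA_eq_fold, pvB_eq]
    have hcons : (p0 :: ps).map (fun p => (p.length : Int)) =
        (p0.length : Int) :: ps.map (fun p => (p.length : Int)) := by simp
    rw [hcons, pvFold_enumerate]
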